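-- pv_equiv track=rewrite | github.com/opendp/opendp | python/test/test_ast.py | check_list_space
-- ===== SOURCE A (Python) =====
-- def check_list_space(docstring):
--     '''
--     >>> check_list_space("""
--     ...     Add a blank line after this one!
--     ...     1. One thing
--     ...     2. After another
--     ... """)
--     'Add a blank line above list that begins with: 1. One thing'
--
--     >>> check_list_space("""
--     ...     >>> 5.0 - 4.0
--     ...     1.0
--     ...
--     ...     That should pass
--     ...     1. but this should not!
--     ... """)
--     'Add a blank line above list that begins with: 1. but this should not!'
--
--     >>> check_list_space("""
--     ...     * This
--     ...     * is fine,
--     ...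
--     ...     but this is
--     ...     * not ok!
--     ... """)
--     'Add a blank line above list that begins with: * not ok!'
--     '''
--     prev_is_text = False
--     for line in docstring.split('\n'):
--         line = line.strip()
--         if prev_is_text and (line.startswith('1.') or line.startswith('* ')):
--             return f'Add a blank line above list that begins with: {line}'
--         prev_is_text = line and not (
--             line.startswith('>>>')
--             or line.startswith('...')
--             or line.startswith('* ')
--         )
-- ===== SOURCE B (Python) =====
-- def check_list_space(docstring):
--     lines = [l.strip() for l in docstring.split('\n')]
--     # candidate-driven: collect the list-marker lines first, then validate
--     # each candidate's predecessor by index lookup (no carried flag)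
--     candidates = [(i, l) for i, l in enumerate(lines)
--                   if i and (l.startswith('1.') or l.startswith('* '))]
--     for i, l in candidates:
--         prev = lines[i - 1]
--         if prev and not prev.startswith(('>>>', '...', '* ')):
--             return f'Add a blank line above list that begins with: {l}'
-- ===== Notes on version B (the rewrite author's own statement) =====
-- stated objective: alternative
-- what changed: Candidate-driven search instead of a stateful line scan: B first collects only the list-marker lines (with their indices), then validates each candidate by an indexed lookback at its predecessor, so no prev_is_text flag is carried and non-marker lines are classified only on demand.
import Mathlib
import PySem

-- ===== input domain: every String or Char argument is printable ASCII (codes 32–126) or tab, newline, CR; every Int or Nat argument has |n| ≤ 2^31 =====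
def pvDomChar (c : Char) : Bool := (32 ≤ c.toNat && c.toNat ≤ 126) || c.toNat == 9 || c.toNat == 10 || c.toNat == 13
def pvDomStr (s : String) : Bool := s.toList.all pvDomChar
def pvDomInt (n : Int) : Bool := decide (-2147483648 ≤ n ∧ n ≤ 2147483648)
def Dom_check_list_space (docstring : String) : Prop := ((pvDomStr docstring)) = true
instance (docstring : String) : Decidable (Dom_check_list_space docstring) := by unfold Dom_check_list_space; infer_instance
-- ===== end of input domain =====

-- B replaces A's stateful prev_is_text scan by a candidate-driven search: collect the
-- list-marker lines first, then validate each candidate's predecessor by index (alternative decomposition, same cost).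

-- ===== PORT A =====
-- the loop over lines, carrying the prev_is_text flag (Python truthiness of the assigned string ported as its Bool value)
def clsLoopA : List (List Char) → Bool → Option String
  | [], _ => none
  | l :: rest, prev =>
    let line := PySem.Chars.strip l
    if prev && (PySem.Chars.startswith line "1.".toList || PySem.Chars.startswith line "* ".toList) then
      some (String.ofList ("Add a blank line above list that begins with: ".toList ++ line))
    else
      clsLoopA rest (!(line == []) &&
        !(PySem.Chars.startswith line ">>>".toList || PySem.Chars.startswith line "...".toList ||
          PySem.Chars.startswith line "* ".toList))

def check_list_space (docstring : String) : Option String :=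
  clsLoopA (PySem.Chars.splitOn docstring.toList "\n".toList) false

-- ===== PORT B =====
-- 'i and (l.startswith('1.') or l.startswith('* '))': truthiness of the enumerate index i plus the marker test
def clsCand (p : Int × List Char) : Bool :=
  !(p.1 == 0) && (PySem.Chars.startswith p.2 "1.".toList || PySem.Chars.startswith p.2 "* ".toList)

def check_list_space_alt (docstring : String) : Option String :=
  let lines := (PySem.Chars.splitOn docstring.toList "\n".toList).map PySem.Chars.strip
  let candidates := (PySem.List.enumerate lines).filter clsCand
  candidates.findSome? (fun p =>
    match PySem.List.pyGet? lines (p.1 - 1) with   -- prev = lines[i - 1]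
    | some prev =>
        if !(prev == []) && !(PySem.Chars.startswith prev ">>>".toList ||
            PySem.Chars.startswith prev "...".toList || PySem.Chars.startswith prev "* ".toList) then
          some (String.ofList ("Add a blank line above list that begins with: ".toList ++ p.2))
        else none
    | none => none)

-- ===== PRECONDITION & SPEC =====
def Spec_check_list_space (docstring : String) (out : Option String) : Prop := out = check_list_space_alt docstring
instance (docstring : String) (out : Option String) : Decidable (Spec_check_list_space docstring out) := by unfold Spec_check_list_space; infer_instance

-- ===== CLAIM (what is proved, stated in full; the proofs are below) =====
def Claim_equal_check_list_space : Prop := ∀ (docstring : String), Dom_check_list_space docstring → Spec_check_list_space docstring (check_list_space docstring)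

-- ===== LEMMAS AND PROOFS =====

-- classification of a (stripped) line as text, and A's loop re-expressed over pre-stripped lines
def clsIsText (s : List Char) : Bool :=
  !(s == []) && !(PySem.Chars.startswith s ">>>".toList || PySem.Chars.startswith s "...".toList ||
    PySem.Chars.startswith s "* ".toList)

def clsMarker (s : List Char) : Bool :=
  PySem.Chars.startswith s "1.".toList || PySem.Chars.startswith s "* ".toList

def clsMsg (s : List Char) : String :=
  String.ofList ("Add a blank line above list that begins with: ".toList ++ s)

def clsLoop' : List (List Char) → Bool → Option String
  | [], _ => none
  | l :: rest, prev =>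
    if prev && clsMarker l then some (clsMsg l) else clsLoop' rest (clsIsText l)

-- B's inner check on a candidate, against the full stripped list
def clsF (lines : List (List Char)) (p : Int × List Char) : Option String :=
  match PySem.List.pyGet? lines (p.1 - 1) with
  | some prev => if clsIsText prev then some (clsMsg p.2) else none
  | none => none

theorem clsLoopA_eq (ls : List (List Char)) (b : Bool) :
    clsLoopA ls b = clsLoop' (ls.map PySem.Chars.strip) b := by
  induction ls generalizing b with
  | nil => rfl
  | cons l rest ih => simp [clsLoopA, clsLoop', clsMarker, clsIsText, clsMsg, ih]

-- the flag A carries at position pre.length is exactly the classification of pre's last line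
def clsFlag (pre : List (List Char)) : Bool :=
  match pre.getLast? with
  | some p => clsIsText p
  | none => false

theorem pyGet?_last (pre : List (List Char)) (rest : List (List Char)) (h : pre ≠ []) :
    PySem.List.pyGet? (pre ++ rest) ((pre.length : Int) - 1) = pre.getLast? := by
  have h1 : (pre.length : Int) - 1 = ((pre.length - 1 : Nat) : Int) := by
    have := List.length_pos_iff.mpr h
    omega
  rw [h1, PySem.List.pyGet?_natCast, List.getElem?_append_left (by have := List.length_pos_iff.mpr h; omega),
    List.getLast?_eq_getElem?]

-- main invariant: A's loop on the suffix equals B's candidate scan over that suffix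
theorem clsMain (lines : List (List Char)) : ∀ (ls pre : List (List Char)),
    lines = pre ++ ls →
    clsLoop' ls (clsFlag pre) =
      ((PySem.List.enumerate ls (pre.length : Int)).filter clsCand).findSome? (clsF lines) := by
  intro ls
  induction ls with
  | nil => intro pre _; simp [clsLoop', PySem.List.enumerate]
  | cons l rest ih =>
    intro pre hpre
    have hrec := ih (pre ++ [l]) (by simp [hpre])
    have hlen : ((pre ++ [l]).length : Int) = (pre.length : Int) + 1 := by simp
    have hflag : clsFlag (pre ++ [l]) = clsIsText l := by simp [clsFlag]
    rw [hflag, hlen] at hrec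
    rw [PySem.List.enumerate_cons]
    by_cases hc : clsCand ((pre.length : Int), l) = true
    · -- candidate kept: its check equals 'if flag then message'
      have hne : pre ≠ [] := by
        intro h0; subst h0; simp [clsCand] at hc
      have hget : PySem.List.pyGet? lines ((pre.length : Int) - 1) = pre.getLast? := by
        rw [hpre]; exact pyGet?_last pre (l :: rest) hne
      have hmark : clsMarker l = true := by
        simp [clsCand] at hc; simp [clsMarker, hc]
      have hf : clsF lines ((pre.length : Int), l) =
          if clsFlag pre then some (clsMsg l) else none := by
        unfold clsF
        simp only [hget]
        rcases hl : pre.getLast? with _ | p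
        · exact absurd hl (by simp [List.getLast?_eq_none_iff, hne])
        · simp [clsFlag, hl]
      rw [List.filter_cons_of_pos hc, List.findSome?_cons, hf]
      cases hb : clsFlag pre with
      | false => simp [clsLoop', hrec]
      | true => simp [clsLoop', hmark]
    · -- candidate dropped: A's return condition is false too
      have hcond : (clsFlag pre && clsMarker l) = false := by
        rcases eq_or_ne pre [] with h0 | h0
        · subst h0; simp [clsFlag]
        · have hzn : (((pre.length : Int)) == 0) = false := by
            simp [List.length_eq_zero_iff, h0]
          have hm : clsMarker l = false := by
            simp only [clsCand, hzn, Bool.not_false, Bool.true_and] at hc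
            exact Bool.eq_false_iff.mpr hc
          simp [hm]
      rw [List.filter_cons_of_neg (by simp [hc])]
      have hstep : clsLoop' (l :: rest) (clsFlag pre) = clsLoop' rest (clsIsText l) := by
        simp [clsLoop', hcond]
      rw [hstep, hrec]

theorem check_list_space_spec_aux (docstring : String) :
    check_list_space docstring = check_list_space_alt docstring := by
  unfold check_list_space check_list_space_alt
  rw [clsLoopA_eq]
  have := clsMain ((PySem.Chars.splitOn docstring.toList "\n".toList).map PySem.Chars.strip)
    ((PySem.Chars.splitOn docstring.toList "\n".toList).map PySem.Chars.strip) [] rfl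
  simp only [clsFlag, List.getLast?_nil, List.length_nil, Nat.cast_zero] at this
  rw [this]
  rfl

-- ===== VERDICT (by name: the statement is the Claim_ definition above) =====
theorem check_list_space_spec : Claim_equal_check_list_space := by
  intro docstring _
  unfold Spec_check_list_space
  exact check_list_space_spec_aux docstring
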